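-- pv_equiv track=rewrite | github.com/sosnicklab/upside2-md | py/run_upside.py | swap_table2d
-- ===== SOURCE A (Python) =====
-- def swap_table2d(nx,ny):
--     idx = lambda xy: xy[0]*ny + xy[1]
--     good = lambda xy: (0<=xy[0]<nx and 0<=xy[1]<ny)
--     swap = lambda i,j: '%i-%i'%(idx(i),idx(j)) if good(i) and good(j) else None
--     horiz0 = [swap((a,b),(a+1,b)) for a in range(0,nx,2) for b in range(0,ny)]
--     horiz1 = [swap((a,b),(a+1,b)) for a in range(1,nx,2) for b in range(0,ny)]
--     vert0  = [swap((a,b),(a,b+1)) for a in range(0,nx)   for b in range(0,ny,2)]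
--     vert1  = [swap((a,b),(a,b+1)) for a in range(0,nx)   for b in range(1,ny,2)]
--     sets = (horiz0,horiz1,vert0,vert1)
--     sets = [[y for y in x if y is not None] for x in sets]
--     return [','.join(x) for x in sets if x]
-- ===== SOURCE B (Python) =====
-- def swap_table2d(nx, ny):
--     horiz0, horiz1, vert0, vert1 = [], [], [], []
--     for a in range(nx):
--         for b in range(ny):
--             i = a * ny + b
--             if a + 1 < nx:
--                 (horiz0 if a % 2 == 0 else horiz1).append('%i-%i' % (i, i + ny))
--             if b + 1 < ny:
--                 (vert0 if b % 2 == 0 else vert1).append('%i-%i' % (i, i + 1))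
--     return [','.join(x) for x in (horiz0, horiz1, vert0, vert1) if x]
-- ===== Notes on version B (the rewrite author's own statement) =====
-- stated objective: simpler
-- what changed: Replaced the four strided comprehensions plus None-filtering by one double loop over all grid cells that appends each existing edge directly to its parity bucket.
import Mathlib
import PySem

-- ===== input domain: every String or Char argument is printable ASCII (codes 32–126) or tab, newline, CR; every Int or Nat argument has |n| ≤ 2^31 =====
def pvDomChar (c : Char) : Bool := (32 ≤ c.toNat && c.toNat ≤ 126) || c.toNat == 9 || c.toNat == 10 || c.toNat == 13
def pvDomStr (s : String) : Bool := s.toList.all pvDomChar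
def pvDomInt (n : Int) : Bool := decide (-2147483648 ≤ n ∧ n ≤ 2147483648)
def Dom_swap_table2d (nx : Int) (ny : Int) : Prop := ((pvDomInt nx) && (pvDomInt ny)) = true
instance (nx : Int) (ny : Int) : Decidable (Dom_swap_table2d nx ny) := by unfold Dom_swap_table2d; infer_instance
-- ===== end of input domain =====

-- B replaces A's four strided comprehensions plus None-filtering by a single double loop over
-- all cells that buckets each edge directly (objective: simpler, same asymptotic cost).

-- ===== PORT A =====
-- A's local lambdas idx / good / swap, kept as helpers
def pvIdxA (ny : Int) (xy : Int × Int) : Int := xy.1 * ny + xy.2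

def pvGoodA (nx ny : Int) (xy : Int × Int) : Bool :=
  decide (0 ≤ xy.1) && decide (xy.1 < nx) && decide (0 ≤ xy.2) && decide (xy.2 < ny)

def pvSwapA (nx ny : Int) (i j : Int × Int) : Option String :=
  if pvGoodA nx ny i && pvGoodA nx ny j then
    some (PySem.Int.toStr (pvIdxA ny i) ++ "-" ++ PySem.Int.toStr (pvIdxA ny j))
  else none

def swap_table2d (nx : Int) (ny : Int) : List String :=
  -- the four double comprehensions (outer var a, inner var b)
  let horiz0 := (PySem.List.pyRange 0 nx 2).flatMap (fun a =>
    (PySem.List.pyRange 0 ny 1).map (fun b => pvSwapA nx ny (a, b) (a + 1, b)))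
  let horiz1 := (PySem.List.pyRange 1 nx 2).flatMap (fun a =>
    (PySem.List.pyRange 0 ny 1).map (fun b => pvSwapA nx ny (a, b) (a + 1, b)))
  let vert0 := (PySem.List.pyRange 0 nx 1).flatMap (fun a =>
    (PySem.List.pyRange 0 ny 2).map (fun b => pvSwapA nx ny (a, b) (a, b + 1)))
  let vert1 := (PySem.List.pyRange 0 nx 1).flatMap (fun a =>
    (PySem.List.pyRange 1 ny 2).map (fun b => pvSwapA nx ny (a, b) (a, b + 1)))
  let sets := [horiz0, horiz1, vert0, vert1]
  -- sets = [[y for y in x if y is not None] for x in sets]  (keeps the somes, as strings)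
  let sets2 := sets.map (fun x => x.filterMap id)
  -- [','.join(x) for x in sets if x]
  (sets2.filter (fun x => !x.isEmpty)).map (fun x => PySem.Str.join "," x)

-- ===== PORT B =====
-- the body of B's inner loop over b (appends to one or two of the four buckets)
def pvCellB (nx ny a : Int)
    (st : List String × List String × List String × List String) (b : Int) :
    List String × List String × List String × List String :=
  let i := a * ny + b
  let st1 :=
    if a + 1 < nx then
      if PySem.Int.mod a 2 = 0 then
        (st.1 ++ [PySem.Int.toStr i ++ "-" ++ PySem.Int.toStr (i + ny)], st.2.1, st.2.2.1, st.2.2.2)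
      else
        (st.1, st.2.1 ++ [PySem.Int.toStr i ++ "-" ++ PySem.Int.toStr (i + ny)], st.2.2.1, st.2.2.2)
    else st
  if b + 1 < ny then
    if PySem.Int.mod b 2 = 0 then
      (st1.1, st1.2.1, st1.2.2.1 ++ [PySem.Int.toStr i ++ "-" ++ PySem.Int.toStr (i + 1)], st1.2.2.2)
    else
      (st1.1, st1.2.1, st1.2.2.1, st1.2.2.2 ++ [PySem.Int.toStr i ++ "-" ++ PySem.Int.toStr (i + 1)])
  else st1

def swap_table2d_alt (nx : Int) (ny : Int) : List String :=
  let st := (PySem.List.pyRange 0 nx 1).foldl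
    (fun st a => (PySem.List.pyRange 0 ny 1).foldl (pvCellB nx ny a) st)
    (([], [], [], []) : List String × List String × List String × List String)
  ([st.1, st.2.1, st.2.2.1, st.2.2.2].filter (fun x => !x.isEmpty)).map
    (fun x => PySem.Str.join "," x)

-- ===== PRECONDITION & SPEC =====
def Spec_swap_table2d (nx : Int) (ny : Int) (out : List String) : Prop := out = swap_table2d_alt nx ny
instance (nx : Int) (ny : Int) (out : List String) : Decidable (Spec_swap_table2d nx ny out) := by unfold Spec_swap_table2d; infer_instance

-- ===== CLAIM (what is proved, stated in full; the proofs are below) =====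
def Claim_equal_swap_table2d : Prop := ∀ (nx : Int) (ny : Int), Dom_swap_table2d nx ny → Spec_swap_table2d nx ny (swap_table2d nx ny)

-- ===== LEMMAS AND PROOFS =====

-- the bucket contribution of cell (a,b): horizontal edge with parity p, vertical edge with parity p
def pvHE (nx ny p a b : Int) : List String :=
  if a + 1 < nx ∧ PySem.Int.mod a 2 = p then
    [PySem.Int.toStr (a * ny + b) ++ "-" ++ PySem.Int.toStr (a * ny + b + ny)]
  else []

def pvVE (ny p a b : Int) : List String :=
  if b + 1 < ny ∧ PySem.Int.mod b 2 = p then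
    [PySem.Int.toStr (a * ny + b) ++ "-" ++ PySem.Int.toStr (a * ny + b + 1)]
  else []

-- range with step two is the even (relative to the start) sublist of the step-one range
theorem pv_two_cons (a b : Int) (h : a < b) :
    PySem.List.pyRange a b 2 = a :: PySem.List.pyRange (a + 2) b 2 := by
  rw [PySem.List.pyRange_of_pos _ _ (by norm_num), PySem.List.pyRange_of_pos _ _ (by norm_num)]
  have h1 : ((b - a + 2 - 1)/2).toNat = (if a + 2 < b then ((b - (a+2) + 2 - 1)/2).toNat else 0) + 1 := by
    split <;> omega
  simp only [if_pos h, h1, List.range_succ_eq_map, List.map_cons, List.map_map, List.cons.injEq]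
  refine ⟨by omega, List.map_congr_left fun k _ => ?_⟩
  simp [Function.comp]; ring

theorem pv_two_eq_filter (a b : Int) :
    PySem.List.pyRange a b 2
      = (PySem.List.pyRange a b 1).filter (fun x => decide ((2:Int) ∣ x - a)) := by
  by_cases h1 : a < b
  · by_cases h2 : a + 1 < b
    · rw [pv_two_cons a b h1, PySem.List.pyRange_one_cons h1, PySem.List.pyRange_one_cons h2]
      have IH := pv_two_eq_filter (a + 2) b
      have hp : (fun x => decide ((2:Int) ∣ x - a))
          = (fun x => decide ((2:Int) ∣ x - (a + 2))) := by
        funext x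
        have : ((2:Int) ∣ x - a) ↔ ((2:Int) ∣ x - (a + 2)) := by omega
        simp [this]
      have h11 : a + 1 + 1 = a + 2 := by ring
      simp only [List.filter_cons, hp, h11, ← IH]
      have e0 : ((2:Int) ∣ a - (a + 2)) := by omega
      have e1 : ¬ ((2:Int) ∣ a + 1 - (a + 2)) := by omega
      simp [e0, e1]
    · have hb : b = a + 1 := by omega
      subst hb
      rw [pv_two_cons a (a+1) h1, PySem.List.pyRange_one_singleton,
          PySem.List.pyRange_of_pos _ _ (by norm_num : (0:Int) < 2)]
      simp
  · rw [PySem.List.pyRange_one_eq_nil (by omega), PySem.List.pyRange_of_pos _ _ (by norm_num : (0:Int) < 2)]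
    simp; omega
termination_by (b - a).toNat
decreasing_by omega

-- a fold appending to all four buckets componentwise is four flatMaps
theorem pv_quad_foldl {α : Type} (f0 f1 f2 f3 : α → List String) (l : List α)
    (st : List String × List String × List String × List String) :
    l.foldl (fun st x => (st.1 ++ f0 x, st.2.1 ++ f1 x, st.2.2.1 ++ f2 x, st.2.2.2 ++ f3 x)) st
      = (st.1 ++ l.flatMap f0, st.2.1 ++ l.flatMap f1, st.2.2.1 ++ l.flatMap f2, st.2.2.2 ++ l.flatMap f3) := by
  induction l generalizing st with
  | nil => simp
  | cons x xs ih => simp [ih, List.append_assoc]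

-- B's cell body in componentwise form
theorem pv_cell_eq (nx ny a : Int)
    (st : List String × List String × List String × List String) (b : Int) :
    pvCellB nx ny a st b
      = (st.1 ++ pvHE nx ny 0 a b, st.2.1 ++ pvHE nx ny 1 a b,
         st.2.2.1 ++ pvVE ny 0 a b, st.2.2.2 ++ pvVE ny 1 a b) := by
  have hmod : ∀ x : Int, PySem.Int.mod x 2 = x % 2 :=
    fun x => PySem.Int.mod_eq_emod_of_pos (by norm_num)
  unfold pvCellB pvHE pvVE
  rcases (show a % 2 = 0 ∨ a % 2 = 1 by omega) with ha | ha <;>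
    rcases (show b % 2 = 0 ∨ b % 2 = 1 by omega) with hb | hb <;>
      by_cases h1 : a + 1 < nx <;> by_cases h2 : b + 1 < ny <;>
        simp [hmod, h1, h2, ha, hb]

-- B's two nested folds compute the four bucket flatMaps
theorem pv_alt_buckets (nx ny : Int) :
    (PySem.List.pyRange 0 nx 1).foldl
      (fun st a => (PySem.List.pyRange 0 ny 1).foldl (pvCellB nx ny a) st)
      (([], [], [], []) : List String × List String × List String × List String)
      = ((PySem.List.pyRange 0 nx 1).flatMap (fun a => (PySem.List.pyRange 0 ny 1).flatMap (pvHE nx ny 0 a)),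
         (PySem.List.pyRange 0 nx 1).flatMap (fun a => (PySem.List.pyRange 0 ny 1).flatMap (pvHE nx ny 1 a)),
         (PySem.List.pyRange 0 nx 1).flatMap (fun a => (PySem.List.pyRange 0 ny 1).flatMap (pvVE ny 0 a)),
         (PySem.List.pyRange 0 nx 1).flatMap (fun a => (PySem.List.pyRange 0 ny 1).flatMap (pvVE ny 1 a))) := by
  have hinner : ∀ a st, (PySem.List.pyRange 0 ny 1).foldl (pvCellB nx ny a) st
      = (st.1 ++ (PySem.List.pyRange 0 ny 1).flatMap (pvHE nx ny 0 a),
         st.2.1 ++ (PySem.List.pyRange 0 ny 1).flatMap (pvHE nx ny 1 a),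
         st.2.2.1 ++ (PySem.List.pyRange 0 ny 1).flatMap (pvVE ny 0 a),
         st.2.2.2 ++ (PySem.List.pyRange 0 ny 1).flatMap (pvVE ny 1 a)) := by
    intro a st
    have : pvCellB nx ny a = (fun st b =>
        (st.1 ++ pvHE nx ny 0 a b, st.2.1 ++ pvHE nx ny 1 a b,
         st.2.2.1 ++ pvVE ny 0 a b, st.2.2.2 ++ pvVE ny 1 a b)) := by
      funext st b; exact pv_cell_eq nx ny a st b
    rw [this, pv_quad_foldl]
  have houter : (fun st a => (PySem.List.pyRange 0 ny 1).foldl (pvCellB nx ny a) st)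
      = (fun (st : List String × List String × List String × List String) a =>
        (st.1 ++ (PySem.List.pyRange 0 ny 1).flatMap (pvHE nx ny 0 a),
         st.2.1 ++ (PySem.List.pyRange 0 ny 1).flatMap (pvHE nx ny 1 a),
         st.2.2.1 ++ (PySem.List.pyRange 0 ny 1).flatMap (pvVE ny 0 a),
         st.2.2.2 ++ (PySem.List.pyRange 0 ny 1).flatMap (pvVE ny 1 a))) := by
    funext st a; exact hinner a st
  rw [houter, pv_quad_foldl]
  simp

-- flatMap over a filtered list, as an if inside the flatMap
theorem pv_flatMap_filter {α : Type} (l : List α) (p : α → Bool) (G : α → List String) :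
    (l.filter p).flatMap G = l.flatMap (fun x => if p x then G x else []) := by
  induction l with
  | nil => rfl
  | cons x xs ih =>
    by_cases h : p x <;> simp [List.filter_cons, h, ih]

-- a step-2 flatMap equals the full-range flatMap when rows of the other parity are empty
theorem pv_stride (s n : Int) (hs : s = 0 ∨ s = 1) (Row : Int → List String)
    (hR : ∀ a, PySem.Int.mod a 2 ≠ s → Row a = []) :
    (PySem.List.pyRange s n 2).flatMap Row = (PySem.List.pyRange 0 n 1).flatMap Row := by
  have hmod : ∀ x : Int, PySem.Int.mod x 2 = x % 2 :=
    fun x => PySem.Int.mod_eq_emod_of_pos (by norm_num)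
  rcases hs with hs | hs
  · subst hs
    rw [pv_two_eq_filter, pv_flatMap_filter]
    refine List.flatMap_congr fun x _ => ?_
    by_cases h : (2:Int) ∣ x - 0
    · rw [if_pos (by simpa using h)]
    · rw [if_neg (by simpa using h), hR x (by rw [hmod]; omega)]
  · subst hs
    by_cases hn : 0 < n
    · rw [pv_two_eq_filter, pv_flatMap_filter,
          PySem.List.pyRange_one_append 0 1 n (by norm_num) (by omega)]
      have h01 : PySem.List.pyRange 0 1 1 = [0] := by
        have := PySem.List.pyRange_one_singleton (a := 0)
        norm_num at this
        exact this
      rw [List.flatMap_append, h01]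
      have hR0 : Row 0 = [] := hR 0 (by rw [hmod]; norm_num)
      simp only [List.flatMap_cons, List.flatMap_nil, hR0, List.nil_append, List.append_nil]
      refine List.flatMap_congr fun x _ => ?_
      by_cases h : (2:Int) ∣ x - 1
      · rw [if_pos (by simpa using h)]
      · rw [if_neg (by simpa using h), hR x (by rw [hmod]; omega)]
    · rw [PySem.List.pyRange_one_eq_nil (by omega),
          PySem.List.pyRange_of_pos _ _ (by norm_num : (0:Int) < 2)]
      rw [if_neg (by omega)]
      simp

-- A's horizontal buckets (filtered) are B's (s = the start offset = the parity)
theorem pv_horiz_eq (nx ny s : Int) (hs : s = 0 ∨ s = 1) :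
    ((PySem.List.pyRange s nx 2).flatMap (fun a =>
      (PySem.List.pyRange 0 ny 1).map (fun b => pvSwapA nx ny (a, b) (a + 1, b)))).filterMap id
    = (PySem.List.pyRange 0 nx 1).flatMap (fun a => (PySem.List.pyRange 0 ny 1).flatMap (pvHE nx ny s a)) := by
  have hmod : ∀ x : Int, PySem.Int.mod x 2 = x % 2 :=
    fun x => PySem.Int.mod_eq_emod_of_pos (by norm_num)
  rw [List.filterMap_flatMap]
  have step1 : ∀ a ∈ PySem.List.pyRange s nx 2,
      ((PySem.List.pyRange 0 ny 1).map (fun b => pvSwapA nx ny (a, b) (a + 1, b))).filterMap id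
        = (PySem.List.pyRange 0 ny 1).flatMap (pvHE nx ny s a) := by
    intro a hamem
    rw [PySem.List.mem_pyRange_iff_of_pos (by norm_num)] at hamem
    obtain ⟨ha1, ha2, ha3⟩ := hamem
    have hp : PySem.Int.mod a 2 = s := by rw [hmod]; omega
    rw [List.filterMap_map, List.filterMap_eq_flatMap_toList]
    refine List.flatMap_congr fun b hbmem => ?_
    rw [PySem.List.mem_pyRange_one] at hbmem
    simp only [Function.comp, id]
    unfold pvSwapA pvGoodA pvIdxA pvHE
    by_cases hx : a + 1 < nx
    · rw [if_pos (by simp; omega), if_pos ⟨hx, hp⟩]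
      simp only [Option.toList_some, List.cons.injEq, and_true]
      have : (a + 1) * ny + b = a * ny + b + ny := by ring
      rw [this]
    · rw [if_neg (by simp; omega), if_neg (by tauto)]
      rfl
  rw [List.flatMap_congr step1]
  exact pv_stride s nx hs _ (fun a h => by
    have : ∀ b, pvHE nx ny s a b = [] := fun b => by
      unfold pvHE; rw [if_neg (by tauto)]
    simp [this])

-- A's vertical buckets (filtered) are B's
theorem pv_vert_eq (nx ny s : Int) (hs : s = 0 ∨ s = 1) :
    ((PySem.List.pyRange 0 nx 1).flatMap (fun a =>
      (PySem.List.pyRange s ny 2).map (fun b => pvSwapA nx ny (a, b) (a, b + 1)))).filterMap id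
    = (PySem.List.pyRange 0 nx 1).flatMap (fun a => (PySem.List.pyRange 0 ny 1).flatMap (pvVE ny s a)) := by
  have hmod : ∀ x : Int, PySem.Int.mod x 2 = x % 2 :=
    fun x => PySem.Int.mod_eq_emod_of_pos (by norm_num)
  rw [List.filterMap_flatMap]
  refine List.flatMap_congr fun a hamem => ?_
  rw [PySem.List.mem_pyRange_one] at hamem
  have step1 : ∀ b ∈ PySem.List.pyRange s ny 2,
      (pvSwapA nx ny (a, b) (a, b + 1)).toList = pvVE ny s a b := by
    intro b hbmem
    rw [PySem.List.mem_pyRange_iff_of_pos (by norm_num)] at hbmem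
    obtain ⟨hb1, hb2, hb3⟩ := hbmem
    have hp : PySem.Int.mod b 2 = s := by rw [hmod]; omega
    unfold pvSwapA pvGoodA pvIdxA pvVE
    by_cases hx : b + 1 < ny
    · rw [if_pos (by simp; omega), if_pos ⟨hx, hp⟩]
      simp only [Option.toList_some, List.cons.injEq, and_true]
      have : a * ny + (b + 1) = a * ny + b + 1 := by ring
      rw [this]
    · rw [if_neg (by simp; omega), if_neg (by tauto)]
      rfl
  rw [List.filterMap_map, List.filterMap_eq_flatMap_toList]
  simp only [Function.comp, id]
  rw [List.flatMap_congr step1]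
  exact pv_stride s ny hs _ (fun b h => by
    unfold pvVE; rw [if_neg (by tauto)])

-- ===== VERDICT (by name: the statement is the Claim_ definition above) =====
theorem swap_table2d_spec : Claim_equal_swap_table2d := by
  intro nx ny _
  show swap_table2d nx ny = swap_table2d_alt nx ny
  unfold swap_table2d swap_table2d_alt
  rw [pv_alt_buckets]
  simp only [List.map_cons, List.map_nil]
  rw [pv_horiz_eq nx ny 0 (Or.inl rfl), pv_horiz_eq nx ny 1 (Or.inr rfl),
      pv_vert_eq nx ny 0 (Or.inl rfl), pv_vert_eq nx ny 1 (Or.inr rfl)]
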